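-- pv_equiv track=rewrite | github.com/YohnWang/mini-tools | markdown-toc/toc.py | is_head
-- ===== SOURCE A (Python) =====
-- def is_head(s):
-- 	state=0
-- 	for i in s:
-- 		if state==0 and i == '#':
-- 			state=1
-- 		elif state==1 and i == '#':
-- 			state=1
-- 		elif state==1 and i == ' ':
-- 			state=2
-- 			return True
-- 		else :
-- 			return False
-- ===== SOURCE B (Python) =====
-- def is_head(s):
--     stripped = s.lstrip('#')
--     if not stripped:
--         return None  # matches A falling off its loop (empty or all-'#')
--     return len(stripped) != len(s) and stripped[0] == ' '
-- ===== Notes on version B (the rewrite author's own statement) =====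
-- stated objective: idiomatic
-- what changed: Replaces the character-by-character 0/1/2 state machine with staged string operations: lstrip('#') once, then decide from the stripped string's length and first character; None is kept for empty/all-'#' strings.
import Mathlib
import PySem

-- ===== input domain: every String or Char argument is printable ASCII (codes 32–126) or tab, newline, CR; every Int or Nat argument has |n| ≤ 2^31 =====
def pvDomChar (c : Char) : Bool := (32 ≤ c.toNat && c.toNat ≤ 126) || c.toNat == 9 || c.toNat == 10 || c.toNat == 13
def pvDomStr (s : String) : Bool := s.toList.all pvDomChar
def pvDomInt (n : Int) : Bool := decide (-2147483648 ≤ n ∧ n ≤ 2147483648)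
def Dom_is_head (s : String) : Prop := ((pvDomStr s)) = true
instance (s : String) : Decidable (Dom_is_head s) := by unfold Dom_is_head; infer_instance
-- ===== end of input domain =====

-- B replaces A's char-by-char 0/1/2 state machine with staged string operations (lstrip('#'),
-- then a length comparison and one character check); same cost, plainer code.

-- ===== PORT A =====
-- A's for-loop with the integer `state`, returning inside the loop; falling off the loop is Python's implicit None.
def isHeadLoopA (state : Int) : List Char → Option Bool
  | [] => none
  | c :: rest =>
    if state = 0 ∧ c = '#' then isHeadLoopA 1 rest
    else if state = 1 ∧ c = '#' then isHeadLoopA 1 rest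
    else if state = 1 ∧ c = ' ' then some true
    else some false

def is_head (s : String) : Option Bool := isHeadLoopA 0 s.toList

-- ===== PORT B =====
-- s.lstrip('#') ported as dropWhile (· == '#'); empty stripped string → None;
-- otherwise len(stripped) != len(s) and stripped[0] == ' '.
def is_head_alt (s : String) : Option Bool :=
  match s.toList.dropWhile (fun c => c == '#') with
  | [] => none
  | c :: rest => some (decide ((c :: rest).length ≠ s.toList.length) && decide (c = ' '))

-- ===== PRECONDITION & SPEC =====
def Spec_is_head (s : String) (out : Option Bool) : Prop := out = is_head_alt s
instance (s : String) (out : Option Bool) : Decidable (Spec_is_head s out) := by unfold Spec_is_head; infer_instance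

-- ===== CLAIM (what is proved, stated in full; the proofs are below) =====
def Claim_equal_is_head : Prop := ∀ (s : String), Dom_is_head s → Spec_is_head s (is_head s)

-- ===== LEMMAS AND PROOFS =====
-- After the first '#', A in state 1 returns according to the first non-'#' character.
theorem isHeadLoopA_one (l : List Char) :
    isHeadLoopA 1 l =
      match l.dropWhile (fun c => c == '#') with
      | [] => none
      | c :: _ => some (decide (c = ' ')) := by
  induction l with
  | nil => rfl
  | cons c rest ih =>
    by_cases hch : c = '#'
    · simp [isHeadLoopA, hch, List.dropWhile, ih]
    · have hb : (c == '#') = false := by simp [hch]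
      by_cases hsp : c = ' ' <;>
        simp [isHeadLoopA, hch, hsp, List.dropWhile, hb]

theorem isHead_eq (l : List Char) :
    isHeadLoopA 0 l =
      match l.dropWhile (fun c => c == '#') with
      | [] => none
      | c :: rest => some (decide ((c :: rest).length ≠ l.length) && decide (c = ' ')) := by
  cases l with
  | nil => rfl
  | cons c rest =>
    by_cases hch : c = '#'
    · have hle := List.length_dropWhile_le (p := fun c => c == '#') rest
      simp only [isHeadLoopA, hch, List.dropWhile, beq_self_eq_true, and_self, if_true,
        isHeadLoopA_one]
      cases hd : rest.dropWhile (fun c => c == '#') with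
      | nil => rfl
      | cons d ds =>
        rw [hd] at hle
        simp at hle ⊢
        omega
    · have hb : (c == '#') = false := by simp [hch]
      by_cases hsp : c = ' ' <;>
        simp [isHeadLoopA, hch, hsp, List.dropWhile, hb]

-- ===== VERDICT (by name: the statement is the Claim_ definition above) =====
theorem is_head_spec : Claim_equal_is_head := by
  intro s _
  unfold Spec_is_head is_head is_head_alt
  exact isHead_eq s.toList
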